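-- pv_equiv track=rewrite | github.com/Viomnz/Zero-OS | src/zero_os/contradiction_engine.py | _recommended_action
-- ===== SOURCE A (Python) =====
-- from typing import Any
--
-- def _recommended_action(issues: list[dict[str, Any]]) -> str:
--     codes = {item["code"] for item in issues}
--     if "self_contradiction_active" in codes or "identity_continuity_broken" in codes:
--         return "Resolve self contradictions before any broader self-upgrade."
--     if "status_request_mutated_state" in codes:
--         return "Split read-only observation from mutating workflows so the branch matches the user goal."
--     if "request_context_dropped" in codes:
--         return "Rebuild the branch so every explicit request target remains attached to at least one step."
--     if "conflicting_recovery_branches" in codes: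
--         return "Choose one guarded remediation branch and rerun instead of mixing recovery and self-repair."
--     if "typed_workflow_not_ready" in codes:
--         return "Refresh the typed workflow lane or choose a ready subsystem before executing that branch."
--     if "runtime_not_ready_for_mutation" in codes:
--         return "Restore runtime readiness before allowing high-impact workflow branches."
--     if "bounded_evolution_not_ready" in codes or "source_evolution_not_ready" in codes:
--         return "Stabilize runtime, continuity, and agent health before allowing evolution branches."
--     if "unknown_step_kind" in codes or "missing_step_kind" in codes:
--         return "Regenerate the branch from typed steps only before execution."
--     if "policy_contract_violation" in codes:
--         return "Route the action through a typed safe workflow instead of a denied raw action."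
--     if "unknown_step_executed" in codes:
--         return "Add a typed execution contract before allowing that step back into planning."
--     return "Maintain the contradiction gate and extend typed reasoning checks across more subsystems."
-- ===== SOURCE B (Python) =====
-- _PRIORITY = {
--     "self_contradiction_active": 0,
--     "identity_continuity_broken": 0,
--     "status_request_mutated_state": 1,
--     "request_context_dropped": 2,
--     "conflicting_recovery_branches": 3,
--     "typed_workflow_not_ready": 4,
--     "runtime_not_ready_for_mutation": 5,
--     "bounded_evolution_not_ready": 6,
--     "source_evolution_not_ready": 6,
--     "unknown_step_kind": 7,
--     "missing_step_kind": 7,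
--     "policy_contract_violation": 8,
--     "unknown_step_executed": 9,
-- }
--
-- _MESSAGES = [
--     "Resolve self contradictions before any broader self-upgrade.",
--     "Split read-only observation from mutating workflows so the branch matches the user goal.",
--     "Rebuild the branch so every explicit request target remains attached to at least one step.",
--     "Choose one guarded remediation branch and rerun instead of mixing recovery and self-repair.",
--     "Refresh the typed workflow lane or choose a ready subsystem before executing that branch.",
--     "Restore runtime readiness before allowing high-impact workflow branches.",
--     "Stabilize runtime, continuity, and agent health before allowing evolution branches.",
--     "Regenerate the branch from typed steps only before execution.",
--     "Route the action through a typed safe workflow instead of a denied raw action.",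
--     "Add a typed execution contract before allowing that step back into planning.",
--     "Maintain the contradiction gate and extend typed reasoning checks across more subsystems.",
-- ]
--
-- def _recommended_action(issues):
--     best = 10
--     for item in issues:
--         best = min(best, _PRIORITY.get(item["code"], 10))
--     return _MESSAGES[best]
-- ===== Notes on version B (the rewrite author's own statement) =====
-- stated objective: alternative
-- what changed: Replaces set-building plus a ten-branch priority if-chain with a single min-reduction: each code is mapped through a priority dict to a rank, one pass keeps the minimum rank, and the answer is a direct index into a message table (no set, no chain of membership tests).
import Mathlib
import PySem

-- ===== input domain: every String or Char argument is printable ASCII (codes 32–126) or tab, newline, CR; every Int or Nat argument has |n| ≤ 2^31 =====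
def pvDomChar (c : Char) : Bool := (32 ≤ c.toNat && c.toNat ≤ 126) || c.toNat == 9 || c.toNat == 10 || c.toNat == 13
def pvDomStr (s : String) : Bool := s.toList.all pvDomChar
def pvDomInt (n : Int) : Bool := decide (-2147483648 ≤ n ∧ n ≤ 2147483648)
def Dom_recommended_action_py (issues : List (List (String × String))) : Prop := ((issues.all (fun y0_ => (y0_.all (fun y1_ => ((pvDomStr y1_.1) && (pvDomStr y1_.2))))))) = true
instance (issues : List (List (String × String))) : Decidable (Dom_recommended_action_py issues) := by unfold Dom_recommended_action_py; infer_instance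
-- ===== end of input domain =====

set_option maxHeartbeats 1000000


-- B replaces A's codes-set plus priority if-chain by a one-pass min-reduction of priority ranks
-- (dict code -> rank), answered by indexing a message table (objective: alternative).

-- item["code"]; the .getD "" default is unreachable under Pre_ (the key is present)
def pvCode (item : List (String × String)) : String :=
  (PySem.Dict.get? (PySem.Dict.mk item) "code").getD ""

-- ===== PORT A =====
def recommended_action_py (issues : List (List (String × String))) : String :=
  let codes : PySem.Set String :=
    issues.foldl (fun s item => PySem.Set.add s (pvCode item)) PySem.Set.empty
  if PySem.Set.contains codes "self_contradiction_active" || PySem.Set.contains codes "identity_continuity_broken" then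
    "Resolve self contradictions before any broader self-upgrade."
  else if PySem.Set.contains codes "status_request_mutated_state" then
    "Split read-only observation from mutating workflows so the branch matches the user goal."
  else if PySem.Set.contains codes "request_context_dropped" then
    "Rebuild the branch so every explicit request target remains attached to at least one step."
  else if PySem.Set.contains codes "conflicting_recovery_branches" then
    "Choose one guarded remediation branch and rerun instead of mixing recovery and self-repair."
  else if PySem.Set.contains codes "typed_workflow_not_ready" then
    "Refresh the typed workflow lane or choose a ready subsystem before executing that branch."
  else if PySem.Set.contains codes "runtime_not_ready_for_mutation" then
    "Restore runtime readiness before allowing high-impact workflow branches."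
  else if PySem.Set.contains codes "bounded_evolution_not_ready" || PySem.Set.contains codes "source_evolution_not_ready" then
    "Stabilize runtime, continuity, and agent health before allowing evolution branches."
  else if PySem.Set.contains codes "unknown_step_kind" || PySem.Set.contains codes "missing_step_kind" then
    "Regenerate the branch from typed steps only before execution."
  else if PySem.Set.contains codes "policy_contract_violation" then
    "Route the action through a typed safe workflow instead of a denied raw action."
  else if PySem.Set.contains codes "unknown_step_executed" then
    "Add a typed execution contract before allowing that step back into planning."
  else
    "Maintain the contradiction gate and extend typed reasoning checks across more subsystems."

-- ===== PORT B =====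
def pvPriority : PySem.Dict String Int := PySem.Dict.ofList
  [ ("self_contradiction_active", 0),
    ("identity_continuity_broken", 0),
    ("status_request_mutated_state", 1),
    ("request_context_dropped", 2),
    ("conflicting_recovery_branches", 3),
    ("typed_workflow_not_ready", 4),
    ("runtime_not_ready_for_mutation", 5),
    ("bounded_evolution_not_ready", 6),
    ("source_evolution_not_ready", 6),
    ("unknown_step_kind", 7),
    ("missing_step_kind", 7),
    ("policy_contract_violation", 8),
    ("unknown_step_executed", 9) ]

def pvMessages : List String :=
  [ "Resolve self contradictions before any broader self-upgrade.",
    "Split read-only observation from mutating workflows so the branch matches the user goal.",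
    "Rebuild the branch so every explicit request target remains attached to at least one step.",
    "Choose one guarded remediation branch and rerun instead of mixing recovery and self-repair.",
    "Refresh the typed workflow lane or choose a ready subsystem before executing that branch.",
    "Restore runtime readiness before allowing high-impact workflow branches.",
    "Stabilize runtime, continuity, and agent health before allowing evolution branches.",
    "Regenerate the branch from typed steps only before execution.",
    "Route the action through a typed safe workflow instead of a denied raw action.",
    "Add a typed execution contract before allowing that step back into planning.",
    "Maintain the contradiction gate and extend typed reasoning checks across more subsystems." ]

def recommended_action_py_alt (issues : List (List (String × String))) : String :=
  let best : Int :=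
    issues.foldl (fun b item => min b (PySem.Dict.getD pvPriority (pvCode item) 10)) 10
  PySem.List.pyGetD pvMessages best ""

-- ===== PRECONDITION & SPEC =====
-- Pre_ excludes exactly the inputs where Python's item["code"] raises KeyError (an item lacks the key).
def Pre_recommended_action_py (issues : List (List (String × String))) : Prop :=
  (issues.all (fun item => (PySem.Dict.get? (PySem.Dict.mk item) "code").isSome)) = true
instance (issues : List (List (String × String))) : Decidable (Pre_recommended_action_py issues) := by unfold Pre_recommended_action_py; infer_instance
def pvWitness_recommended_action_py : (List (List (String × String))) := [[("code", "request_context_dropped")]]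

def Spec_recommended_action_py (issues : List (List (String × String))) (out : String) : Prop := out = recommended_action_py_alt issues
instance (issues : List (List (String × String))) (out : String) : Decidable (Spec_recommended_action_py issues out) := by unfold Spec_recommended_action_py; infer_instance

-- ===== CLAIM =====
def Claim_equal_recommended_action_py : Prop := ∀ (issues : List (List (String × String))), Dom_recommended_action_py issues → Pre_recommended_action_py issues → Spec_recommended_action_py issues (recommended_action_py issues)

-- ===== LEMMAS AND PROOFS =====

-- the rank function of B's dict lookup, and the dict's key list
def pvRank (c : String) : Int := PySem.Dict.getD pvPriority c 10

def pvKeys : List String :=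
  [ "self_contradiction_active", "identity_continuity_broken", "status_request_mutated_state", "request_context_dropped", "conflicting_recovery_branches", "typed_workflow_not_ready", "runtime_not_ready_for_mutation", "bounded_evolution_not_ready", "source_evolution_not_ready", "unknown_step_kind", "missing_step_kind", "policy_contract_violation", "unknown_step_executed" ]

theorem pvRank_key_self_contradiction_active : pvRank "self_contradiction_active" = 0 := by decide
theorem pvRank_key_identity_continuity_broken : pvRank "identity_continuity_broken" = 0 := by decide
theorem pvRank_key_status_request_mutated_state : pvRank "status_request_mutated_state" = 1 := by decide
theorem pvRank_key_request_context_dropped : pvRank "request_context_dropped" = 2 := by decide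
theorem pvRank_key_conflicting_recovery_branches : pvRank "conflicting_recovery_branches" = 3 := by decide
theorem pvRank_key_typed_workflow_not_ready : pvRank "typed_workflow_not_ready" = 4 := by decide
theorem pvRank_key_runtime_not_ready_for_mutation : pvRank "runtime_not_ready_for_mutation" = 5 := by decide
theorem pvRank_key_bounded_evolution_not_ready : pvRank "bounded_evolution_not_ready" = 6 := by decide
theorem pvRank_key_source_evolution_not_ready : pvRank "source_evolution_not_ready" = 6 := by decide
theorem pvRank_key_unknown_step_kind : pvRank "unknown_step_kind" = 7 := by decide
theorem pvRank_key_missing_step_kind : pvRank "missing_step_kind" = 7 := by decide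
theorem pvRank_key_policy_contract_violation : pvRank "policy_contract_violation" = 8 := by decide
theorem pvRank_key_unknown_step_executed : pvRank "unknown_step_executed" = 9 := by decide

theorem pvRank_notkey (c : String) (h : c ∉ pvKeys) : pvRank c = 10 := by
  simp only [pvKeys, List.mem_cons, List.not_mem_nil, or_false, not_or] at h
  obtain ⟨n0, n1, n2, n3, n4, n5, n6, n7, n8, n9, n10, n11, n12⟩ := h
  have hitems : pvPriority.items =
    [ ("self_contradiction_active", (0 : Int)), ("identity_continuity_broken", (0 : Int)), ("status_request_mutated_state", (1 : Int)), ("request_context_dropped", (2 : Int)), ("conflicting_recovery_branches", (3 : Int)), ("typed_workflow_not_ready", (4 : Int)), ("runtime_not_ready_for_mutation", (5 : Int)), ("bounded_evolution_not_ready", (6 : Int)), ("source_evolution_not_ready", (6 : Int)), ("unknown_step_kind", (7 : Int)), ("missing_step_kind", (7 : Int)), ("policy_contract_violation", (8 : Int)), ("unknown_step_executed", (9 : Int)) ] := by decide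
  have e0 : ("self_contradiction_active" == c) = false := beq_eq_false_iff_ne.mpr (Ne.symm n0)
  have e1 : ("identity_continuity_broken" == c) = false := beq_eq_false_iff_ne.mpr (Ne.symm n1)
  have e2 : ("status_request_mutated_state" == c) = false := beq_eq_false_iff_ne.mpr (Ne.symm n2)
  have e3 : ("request_context_dropped" == c) = false := beq_eq_false_iff_ne.mpr (Ne.symm n3)
  have e4 : ("conflicting_recovery_branches" == c) = false := beq_eq_false_iff_ne.mpr (Ne.symm n4)
  have e5 : ("typed_workflow_not_ready" == c) = false := beq_eq_false_iff_ne.mpr (Ne.symm n5)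
  have e6 : ("runtime_not_ready_for_mutation" == c) = false := beq_eq_false_iff_ne.mpr (Ne.symm n6)
  have e7 : ("bounded_evolution_not_ready" == c) = false := beq_eq_false_iff_ne.mpr (Ne.symm n7)
  have e8 : ("source_evolution_not_ready" == c) = false := beq_eq_false_iff_ne.mpr (Ne.symm n8)
  have e9 : ("unknown_step_kind" == c) = false := beq_eq_false_iff_ne.mpr (Ne.symm n9)
  have e10 : ("missing_step_kind" == c) = false := beq_eq_false_iff_ne.mpr (Ne.symm n10)
  have e11 : ("policy_contract_violation" == c) = false := beq_eq_false_iff_ne.mpr (Ne.symm n11)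
  have e12 : ("unknown_step_executed" == c) = false := beq_eq_false_iff_ne.mpr (Ne.symm n12)
  simp only [pvRank, PySem.Dict.getD, PySem.Dict.get?, hitems, List.find?,
    e0, e1, e2, e3, e4, e5, e6, e7, e8, e9, e10, e11, e12]
  rfl

theorem pvMsg_0 : PySem.List.pyGetD pvMessages (0 : Int) "" = "Resolve self contradictions before any broader self-upgrade." := by rfl
theorem pvMsg_1 : PySem.List.pyGetD pvMessages (1 : Int) "" = "Split read-only observation from mutating workflows so the branch matches the user goal." := by rfl
theorem pvMsg_2 : PySem.List.pyGetD pvMessages (2 : Int) "" = "Rebuild the branch so every explicit request target remains attached to at least one step." := by rfl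
theorem pvMsg_3 : PySem.List.pyGetD pvMessages (3 : Int) "" = "Choose one guarded remediation branch and rerun instead of mixing recovery and self-repair." := by rfl
theorem pvMsg_4 : PySem.List.pyGetD pvMessages (4 : Int) "" = "Refresh the typed workflow lane or choose a ready subsystem before executing that branch." := by rfl
theorem pvMsg_5 : PySem.List.pyGetD pvMessages (5 : Int) "" = "Restore runtime readiness before allowing high-impact workflow branches." := by rfl
theorem pvMsg_6 : PySem.List.pyGetD pvMessages (6 : Int) "" = "Stabilize runtime, continuity, and agent health before allowing evolution branches." := by rfl
theorem pvMsg_7 : PySem.List.pyGetD pvMessages (7 : Int) "" = "Regenerate the branch from typed steps only before execution." := by rfl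
theorem pvMsg_8 : PySem.List.pyGetD pvMessages (8 : Int) "" = "Route the action through a typed safe workflow instead of a denied raw action." := by rfl
theorem pvMsg_9 : PySem.List.pyGetD pvMessages (9 : Int) "" = "Add a typed execution contract before allowing that step back into planning." := by rfl
theorem pvMsg_10 : PySem.List.pyGetD pvMessages (10 : Int) "" = "Maintain the contradiction gate and extend typed reasoning checks across more subsystems." := by rfl

def pvMin (cs : List String) (b : Int) : Int := cs.foldl (fun b c => min b (pvRank c)) b

theorem pvMin_le_init (cs : List String) (b : Int) : pvMin cs b ≤ b := by
  induction cs generalizing b with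
  | nil => simp [pvMin]
  | cons c cs ih =>
    have := ih (min b (pvRank c))
    simp only [pvMin, List.foldl_cons] at this ⊢
    omega

theorem pvMin_le_mem (cs : List String) (b : Int) (c : String) (hc : c ∈ cs) :
    pvMin cs b ≤ pvRank c := by
  induction cs generalizing b with
  | nil => cases hc
  | cons d cs ih =>
    rcases List.mem_cons.mp hc with rfl | hc'
    · have := pvMin_le_init cs (min b (pvRank c))
      simp only [pvMin, List.foldl_cons] at this ⊢
      omega
    · exact ih (min b (pvRank d)) hc'

theorem pvMin_lb (cs : List String) (b k : Int) (hk : k ≤ b)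
    (h : ∀ c ∈ cs, k ≤ pvRank c) : k ≤ pvMin cs b := by
  induction cs generalizing b with
  | nil => simpa [pvMin] using hk
  | cons d cs ih =>
    have hd := h d List.mem_cons_self
    exact ih (min b (pvRank d)) (le_min hk hd) (fun c hc => h c (List.mem_cons_of_mem _ hc))

theorem contains_codes (issues : List (List (String × String))) (s : String) :
    (PySem.Set.contains (issues.foldl (fun acc item => PySem.Set.add acc (pvCode item)) PySem.Set.empty) s)
    = decide (s ∈ issues.map pvCode) := by
  have key : (PySem.Set.contains (issues.foldl (fun acc item => PySem.Set.add acc (pvCode item)) PySem.Set.empty) s) = true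
      ↔ s ∈ issues.map pvCode := by
    rw [PySem.Set.contains_iff, PySem.Set.mem_foldl_add]
    simp [List.mem_map, eq_comm, PySem.Set.empty]
  by_cases h : s ∈ issues.map pvCode
  · simp only [h, decide_true]; exact key.mpr h
  · simp only [h, decide_false]
    rw [← Bool.not_eq_true, key]; exact h

theorem pvLB_0 (cs : List String) : ∀ c ∈ cs, (0 : Int) ≤ pvRank c := by
  intro c hc
  by_cases hk : c ∈ pvKeys
  · simp only [pvKeys, List.mem_cons, List.not_mem_nil, or_false] at hk
    rcases hk with rfl|rfl|rfl|rfl|rfl|rfl|rfl|rfl|rfl|rfl|rfl|rfl|rfl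
    · rw [pvRank_key_self_contradiction_active] <;> decide
    · rw [pvRank_key_identity_continuity_broken] <;> decide
    · rw [pvRank_key_status_request_mutated_state] <;> decide
    · rw [pvRank_key_request_context_dropped] <;> decide
    · rw [pvRank_key_conflicting_recovery_branches] <;> decide
    · rw [pvRank_key_typed_workflow_not_ready] <;> decide
    · rw [pvRank_key_runtime_not_ready_for_mutation] <;> decide
    · rw [pvRank_key_bounded_evolution_not_ready] <;> decide
    · rw [pvRank_key_source_evolution_not_ready] <;> decide
    · rw [pvRank_key_unknown_step_kind] <;> decide
    · rw [pvRank_key_missing_step_kind] <;> decide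
    · rw [pvRank_key_policy_contract_violation] <;> decide
    · rw [pvRank_key_unknown_step_executed] <;> decide
  · rw [pvRank_notkey c hk] <;> decide

theorem pvLB_1 (cs : List String) (h0_0 : "self_contradiction_active" ∉ cs) (h0_1 : "identity_continuity_broken" ∉ cs): ∀ c ∈ cs, (1 : Int) ≤ pvRank c := by
  intro c hc
  by_cases hk : c ∈ pvKeys
  · simp only [pvKeys, List.mem_cons, List.not_mem_nil, or_false] at hk
    rcases hk with rfl|rfl|rfl|rfl|rfl|rfl|rfl|rfl|rfl|rfl|rfl|rfl|rfl
    · exact absurd hc h0_0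
    · exact absurd hc h0_1
    · rw [pvRank_key_status_request_mutated_state] <;> decide
    · rw [pvRank_key_request_context_dropped] <;> decide
    · rw [pvRank_key_conflicting_recovery_branches] <;> decide
    · rw [pvRank_key_typed_workflow_not_ready] <;> decide
    · rw [pvRank_key_runtime_not_ready_for_mutation] <;> decide
    · rw [pvRank_key_bounded_evolution_not_ready] <;> decide
    · rw [pvRank_key_source_evolution_not_ready] <;> decide
    · rw [pvRank_key_unknown_step_kind] <;> decide
    · rw [pvRank_key_missing_step_kind] <;> decide
    · rw [pvRank_key_policy_contract_violation] <;> decide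
    · rw [pvRank_key_unknown_step_executed] <;> decide
  · rw [pvRank_notkey c hk] <;> decide

theorem pvLB_2 (cs : List String) (h0_0 : "self_contradiction_active" ∉ cs) (h0_1 : "identity_continuity_broken" ∉ cs) (h1_0 : "status_request_mutated_state" ∉ cs): ∀ c ∈ cs, (2 : Int) ≤ pvRank c := by
  intro c hc
  by_cases hk : c ∈ pvKeys
  · simp only [pvKeys, List.mem_cons, List.not_mem_nil, or_false] at hk
    rcases hk with rfl|rfl|rfl|rfl|rfl|rfl|rfl|rfl|rfl|rfl|rfl|rfl|rfl
    · exact absurd hc h0_0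
    · exact absurd hc h0_1
    · exact absurd hc h1_0
    · rw [pvRank_key_request_context_dropped] <;> decide
    · rw [pvRank_key_conflicting_recovery_branches] <;> decide
    · rw [pvRank_key_typed_workflow_not_ready] <;> decide
    · rw [pvRank_key_runtime_not_ready_for_mutation] <;> decide
    · rw [pvRank_key_bounded_evolution_not_ready] <;> decide
    · rw [pvRank_key_source_evolution_not_ready] <;> decide
    · rw [pvRank_key_unknown_step_kind] <;> decide
    · rw [pvRank_key_missing_step_kind] <;> decide
    · rw [pvRank_key_policy_contract_violation] <;> decide
    · rw [pvRank_key_unknown_step_executed] <;> decide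
  · rw [pvRank_notkey c hk] <;> decide

theorem pvLB_3 (cs : List String) (h0_0 : "self_contradiction_active" ∉ cs) (h0_1 : "identity_continuity_broken" ∉ cs) (h1_0 : "status_request_mutated_state" ∉ cs) (h2_0 : "request_context_dropped" ∉ cs): ∀ c ∈ cs, (3 : Int) ≤ pvRank c := by
  intro c hc
  by_cases hk : c ∈ pvKeys
  · simp only [pvKeys, List.mem_cons, List.not_mem_nil, or_false] at hk
    rcases hk with rfl|rfl|rfl|rfl|rfl|rfl|rfl|rfl|rfl|rfl|rfl|rfl|rfl
    · exact absurd hc h0_0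
    · exact absurd hc h0_1
    · exact absurd hc h1_0
    · exact absurd hc h2_0
    · rw [pvRank_key_conflicting_recovery_branches] <;> decide
    · rw [pvRank_key_typed_workflow_not_ready] <;> decide
    · rw [pvRank_key_runtime_not_ready_for_mutation] <;> decide
    · rw [pvRank_key_bounded_evolution_not_ready] <;> decide
    · rw [pvRank_key_source_evolution_not_ready] <;> decide
    · rw [pvRank_key_unknown_step_kind] <;> decide
    · rw [pvRank_key_missing_step_kind] <;> decide
    · rw [pvRank_key_policy_contract_violation] <;> decide
    · rw [pvRank_key_unknown_step_executed] <;> decide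
  · rw [pvRank_notkey c hk] <;> decide

theorem pvLB_4 (cs : List String) (h0_0 : "self_contradiction_active" ∉ cs) (h0_1 : "identity_continuity_broken" ∉ cs) (h1_0 : "status_request_mutated_state" ∉ cs) (h2_0 : "request_context_dropped" ∉ cs) (h3_0 : "conflicting_recovery_branches" ∉ cs): ∀ c ∈ cs, (4 : Int) ≤ pvRank c := by
  intro c hc
  by_cases hk : c ∈ pvKeys
  · simp only [pvKeys, List.mem_cons, List.not_mem_nil, or_false] at hk
    rcases hk with rfl|rfl|rfl|rfl|rfl|rfl|rfl|rfl|rfl|rfl|rfl|rfl|rfl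
    · exact absurd hc h0_0
    · exact absurd hc h0_1
    · exact absurd hc h1_0
    · exact absurd hc h2_0
    · exact absurd hc h3_0
    · rw [pvRank_key_typed_workflow_not_ready] <;> decide
    · rw [pvRank_key_runtime_not_ready_for_mutation] <;> decide
    · rw [pvRank_key_bounded_evolution_not_ready] <;> decide
    · rw [pvRank_key_source_evolution_not_ready] <;> decide
    · rw [pvRank_key_unknown_step_kind] <;> decide
    · rw [pvRank_key_missing_step_kind] <;> decide
    · rw [pvRank_key_policy_contract_violation] <;> decide
    · rw [pvRank_key_unknown_step_executed] <;> decide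
  · rw [pvRank_notkey c hk] <;> decide

theorem pvLB_5 (cs : List String) (h0_0 : "self_contradiction_active" ∉ cs) (h0_1 : "identity_continuity_broken" ∉ cs) (h1_0 : "status_request_mutated_state" ∉ cs) (h2_0 : "request_context_dropped" ∉ cs) (h3_0 : "conflicting_recovery_branches" ∉ cs) (h4_0 : "typed_workflow_not_ready" ∉ cs): ∀ c ∈ cs, (5 : Int) ≤ pvRank c := by
  intro c hc
  by_cases hk : c ∈ pvKeys
  · simp only [pvKeys, List.mem_cons, List.not_mem_nil, or_false] at hk
    rcases hk with rfl|rfl|rfl|rfl|rfl|rfl|rfl|rfl|rfl|rfl|rfl|rfl|rfl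
    · exact absurd hc h0_0
    · exact absurd hc h0_1
    · exact absurd hc h1_0
    · exact absurd hc h2_0
    · exact absurd hc h3_0
    · exact absurd hc h4_0
    · rw [pvRank_key_runtime_not_ready_for_mutation] <;> decide
    · rw [pvRank_key_bounded_evolution_not_ready] <;> decide
    · rw [pvRank_key_source_evolution_not_ready] <;> decide
    · rw [pvRank_key_unknown_step_kind] <;> decide
    · rw [pvRank_key_missing_step_kind] <;> decide
    · rw [pvRank_key_policy_contract_violation] <;> decide
    · rw [pvRank_key_unknown_step_executed] <;> decide
  · rw [pvRank_notkey c hk] <;> decide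

theorem pvLB_6 (cs : List String) (h0_0 : "self_contradiction_active" ∉ cs) (h0_1 : "identity_continuity_broken" ∉ cs) (h1_0 : "status_request_mutated_state" ∉ cs) (h2_0 : "request_context_dropped" ∉ cs) (h3_0 : "conflicting_recovery_branches" ∉ cs) (h4_0 : "typed_workflow_not_ready" ∉ cs) (h5_0 : "runtime_not_ready_for_mutation" ∉ cs): ∀ c ∈ cs, (6 : Int) ≤ pvRank c := by
  intro c hc
  by_cases hk : c ∈ pvKeys
  · simp only [pvKeys, List.mem_cons, List.not_mem_nil, or_false] at hk
    rcases hk with rfl|rfl|rfl|rfl|rfl|rfl|rfl|rfl|rfl|rfl|rfl|rfl|rfl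
    · exact absurd hc h0_0
    · exact absurd hc h0_1
    · exact absurd hc h1_0
    · exact absurd hc h2_0
    · exact absurd hc h3_0
    · exact absurd hc h4_0
    · exact absurd hc h5_0
    · rw [pvRank_key_bounded_evolution_not_ready] <;> decide
    · rw [pvRank_key_source_evolution_not_ready] <;> decide
    · rw [pvRank_key_unknown_step_kind] <;> decide
    · rw [pvRank_key_missing_step_kind] <;> decide
    · rw [pvRank_key_policy_contract_violation] <;> decide
    · rw [pvRank_key_unknown_step_executed] <;> decide
  · rw [pvRank_notkey c hk] <;> decide

theorem pvLB_7 (cs : List String) (h0_0 : "self_contradiction_active" ∉ cs) (h0_1 : "identity_continuity_broken" ∉ cs) (h1_0 : "status_request_mutated_state" ∉ cs) (h2_0 : "request_context_dropped" ∉ cs) (h3_0 : "conflicting_recovery_branches" ∉ cs) (h4_0 : "typed_workflow_not_ready" ∉ cs) (h5_0 : "runtime_not_ready_for_mutation" ∉ cs) (h6_0 : "bounded_evolution_not_ready" ∉ cs) (h6_1 : "source_evolution_not_ready" ∉ cs): ∀ c ∈ cs, (7 : Int) ≤ pvRank c := by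
  intro c hc
  by_cases hk : c ∈ pvKeys
  · simp only [pvKeys, List.mem_cons, List.not_mem_nil, or_false] at hk
    rcases hk with rfl|rfl|rfl|rfl|rfl|rfl|rfl|rfl|rfl|rfl|rfl|rfl|rfl
    · exact absurd hc h0_0
    · exact absurd hc h0_1
    · exact absurd hc h1_0
    · exact absurd hc h2_0
    · exact absurd hc h3_0
    · exact absurd hc h4_0
    · exact absurd hc h5_0
    · exact absurd hc h6_0
    · exact absurd hc h6_1
    · rw [pvRank_key_unknown_step_kind] <;> decide
    · rw [pvRank_key_missing_step_kind] <;> decide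
    · rw [pvRank_key_policy_contract_violation] <;> decide
    · rw [pvRank_key_unknown_step_executed] <;> decide
  · rw [pvRank_notkey c hk] <;> decide

theorem pvLB_8 (cs : List String) (h0_0 : "self_contradiction_active" ∉ cs) (h0_1 : "identity_continuity_broken" ∉ cs) (h1_0 : "status_request_mutated_state" ∉ cs) (h2_0 : "request_context_dropped" ∉ cs) (h3_0 : "conflicting_recovery_branches" ∉ cs) (h4_0 : "typed_workflow_not_ready" ∉ cs) (h5_0 : "runtime_not_ready_for_mutation" ∉ cs) (h6_0 : "bounded_evolution_not_ready" ∉ cs) (h6_1 : "source_evolution_not_ready" ∉ cs) (h7_0 : "unknown_step_kind" ∉ cs) (h7_1 : "missing_step_kind" ∉ cs): ∀ c ∈ cs, (8 : Int) ≤ pvRank c := by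
  intro c hc
  by_cases hk : c ∈ pvKeys
  · simp only [pvKeys, List.mem_cons, List.not_mem_nil, or_false] at hk
    rcases hk with rfl|rfl|rfl|rfl|rfl|rfl|rfl|rfl|rfl|rfl|rfl|rfl|rfl
    · exact absurd hc h0_0
    · exact absurd hc h0_1
    · exact absurd hc h1_0
    · exact absurd hc h2_0
    · exact absurd hc h3_0
    · exact absurd hc h4_0
    · exact absurd hc h5_0
    · exact absurd hc h6_0
    · exact absurd hc h6_1
    · exact absurd hc h7_0
    · exact absurd hc h7_1
    · rw [pvRank_key_policy_contract_violation] <;> decide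
    · rw [pvRank_key_unknown_step_executed] <;> decide
  · rw [pvRank_notkey c hk] <;> decide

theorem pvLB_9 (cs : List String) (h0_0 : "self_contradiction_active" ∉ cs) (h0_1 : "identity_continuity_broken" ∉ cs) (h1_0 : "status_request_mutated_state" ∉ cs) (h2_0 : "request_context_dropped" ∉ cs) (h3_0 : "conflicting_recovery_branches" ∉ cs) (h4_0 : "typed_workflow_not_ready" ∉ cs) (h5_0 : "runtime_not_ready_for_mutation" ∉ cs) (h6_0 : "bounded_evolution_not_ready" ∉ cs) (h6_1 : "source_evolution_not_ready" ∉ cs) (h7_0 : "unknown_step_kind" ∉ cs) (h7_1 : "missing_step_kind" ∉ cs) (h8_0 : "policy_contract_violation" ∉ cs): ∀ c ∈ cs, (9 : Int) ≤ pvRank c := by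
  intro c hc
  by_cases hk : c ∈ pvKeys
  · simp only [pvKeys, List.mem_cons, List.not_mem_nil, or_false] at hk
    rcases hk with rfl|rfl|rfl|rfl|rfl|rfl|rfl|rfl|rfl|rfl|rfl|rfl|rfl
    · exact absurd hc h0_0
    · exact absurd hc h0_1
    · exact absurd hc h1_0
    · exact absurd hc h2_0
    · exact absurd hc h3_0
    · exact absurd hc h4_0
    · exact absurd hc h5_0
    · exact absurd hc h6_0
    · exact absurd hc h6_1
    · exact absurd hc h7_0
    · exact absurd hc h7_1
    · exact absurd hc h8_0
    · rw [pvRank_key_unknown_step_executed] <;> decide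
  · rw [pvRank_notkey c hk] <;> decide

theorem pvLB_10 (cs : List String) (h0_0 : "self_contradiction_active" ∉ cs) (h0_1 : "identity_continuity_broken" ∉ cs) (h1_0 : "status_request_mutated_state" ∉ cs) (h2_0 : "request_context_dropped" ∉ cs) (h3_0 : "conflicting_recovery_branches" ∉ cs) (h4_0 : "typed_workflow_not_ready" ∉ cs) (h5_0 : "runtime_not_ready_for_mutation" ∉ cs) (h6_0 : "bounded_evolution_not_ready" ∉ cs) (h6_1 : "source_evolution_not_ready" ∉ cs) (h7_0 : "unknown_step_kind" ∉ cs) (h7_1 : "missing_step_kind" ∉ cs) (h8_0 : "policy_contract_violation" ∉ cs) (h9_0 : "unknown_step_executed" ∉ cs): ∀ c ∈ cs, (10 : Int) ≤ pvRank c := by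
  intro c hc
  by_cases hk : c ∈ pvKeys
  · simp only [pvKeys, List.mem_cons, List.not_mem_nil, or_false] at hk
    rcases hk with rfl|rfl|rfl|rfl|rfl|rfl|rfl|rfl|rfl|rfl|rfl|rfl|rfl
    · exact absurd hc h0_0
    · exact absurd hc h0_1
    · exact absurd hc h1_0
    · exact absurd hc h2_0
    · exact absurd hc h3_0
    · exact absurd hc h4_0
    · exact absurd hc h5_0
    · exact absurd hc h6_0
    · exact absurd hc h6_1
    · exact absurd hc h7_0
    · exact absurd hc h7_1
    · exact absurd hc h8_0
    · exact absurd hc h9_0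
  · rw [pvRank_notkey c hk] <;> decide

-- ===== VERDICT (by name: the statement is the Claim_ definition above) =====
theorem recommended_action_py_spec : Claim_equal_recommended_action_py := by
  intro issues _ _
  unfold Spec_recommended_action_py recommended_action_py recommended_action_py_alt
  set cs := issues.map pvCode with hcs
  have hB : issues.foldl (fun b item => min b (PySem.Dict.getD pvPriority (pvCode item) 10)) 10
      = pvMin cs 10 := by
    rw [hcs, pvMin, List.foldl_map]; rfl
  rw [hB]
  simp only [contains_codes, ← hcs, Bool.or_eq_true, decide_eq_true_eq]
  by_cases p0 : "self_contradiction_active" ∈ cs ∨ "identity_continuity_broken" ∈ cs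
  · rw [if_pos p0]
    have hub : pvMin cs 10 ≤ 0 := by
      rcases p0 with p | p
      · have h := pvMin_le_mem cs 10 _ p; rwa [pvRank_key_self_contradiction_active] at h
      · have h := pvMin_le_mem cs 10 _ p; rwa [pvRank_key_identity_continuity_broken] at h
    have hM : pvMin cs 10 = 0 := le_antisymm hub (pvMin_lb cs 10 0 (by norm_num) (pvLB_0 cs ))
    rw [hM, pvMsg_0]
  rw [if_neg p0]; push_neg at p0
  by_cases p1 : "status_request_mutated_state" ∈ cs
  · rw [if_pos p1]
    have hub : pvMin cs 10 ≤ 1 := by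
      have h := pvMin_le_mem cs 10 _ p1; rwa [pvRank_key_status_request_mutated_state] at h
    have hM : pvMin cs 10 = 1 := le_antisymm hub (pvMin_lb cs 10 1 (by norm_num) (pvLB_1 cs p0.1 p0.2))
    rw [hM, pvMsg_1]
  rw [if_neg p1]
  by_cases p2 : "request_context_dropped" ∈ cs
  · rw [if_pos p2]
    have hub : pvMin cs 10 ≤ 2 := by
      have h := pvMin_le_mem cs 10 _ p2; rwa [pvRank_key_request_context_dropped] at h
    have hM : pvMin cs 10 = 2 := le_antisymm hub (pvMin_lb cs 10 2 (by norm_num) (pvLB_2 cs p0.1 p0.2 p1))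
    rw [hM, pvMsg_2]
  rw [if_neg p2]
  by_cases p3 : "conflicting_recovery_branches" ∈ cs
  · rw [if_pos p3]
    have hub : pvMin cs 10 ≤ 3 := by
      have h := pvMin_le_mem cs 10 _ p3; rwa [pvRank_key_conflicting_recovery_branches] at h
    have hM : pvMin cs 10 = 3 := le_antisymm hub (pvMin_lb cs 10 3 (by norm_num) (pvLB_3 cs p0.1 p0.2 p1 p2))
    rw [hM, pvMsg_3]
  rw [if_neg p3]
  by_cases p4 : "typed_workflow_not_ready" ∈ cs
  · rw [if_pos p4]
    have hub : pvMin cs 10 ≤ 4 := by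
      have h := pvMin_le_mem cs 10 _ p4; rwa [pvRank_key_typed_workflow_not_ready] at h
    have hM : pvMin cs 10 = 4 := le_antisymm hub (pvMin_lb cs 10 4 (by norm_num) (pvLB_4 cs p0.1 p0.2 p1 p2 p3))
    rw [hM, pvMsg_4]
  rw [if_neg p4]
  by_cases p5 : "runtime_not_ready_for_mutation" ∈ cs
  · rw [if_pos p5]
    have hub : pvMin cs 10 ≤ 5 := by
      have h := pvMin_le_mem cs 10 _ p5; rwa [pvRank_key_runtime_not_ready_for_mutation] at h
    have hM : pvMin cs 10 = 5 := le_antisymm hub (pvMin_lb cs 10 5 (by norm_num) (pvLB_5 cs p0.1 p0.2 p1 p2 p3 p4))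
    rw [hM, pvMsg_5]
  rw [if_neg p5]
  by_cases p6 : "bounded_evolution_not_ready" ∈ cs ∨ "source_evolution_not_ready" ∈ cs
  · rw [if_pos p6]
    have hub : pvMin cs 10 ≤ 6 := by
      rcases p6 with p | p
      · have h := pvMin_le_mem cs 10 _ p; rwa [pvRank_key_bounded_evolution_not_ready] at h
      · have h := pvMin_le_mem cs 10 _ p; rwa [pvRank_key_source_evolution_not_ready] at h
    have hM : pvMin cs 10 = 6 := le_antisymm hub (pvMin_lb cs 10 6 (by norm_num) (pvLB_6 cs p0.1 p0.2 p1 p2 p3 p4 p5))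
    rw [hM, pvMsg_6]
  rw [if_neg p6]; push_neg at p6
  by_cases p7 : "unknown_step_kind" ∈ cs ∨ "missing_step_kind" ∈ cs
  · rw [if_pos p7]
    have hub : pvMin cs 10 ≤ 7 := by
      rcases p7 with p | p
      · have h := pvMin_le_mem cs 10 _ p; rwa [pvRank_key_unknown_step_kind] at h
      · have h := pvMin_le_mem cs 10 _ p; rwa [pvRank_key_missing_step_kind] at h
    have hM : pvMin cs 10 = 7 := le_antisymm hub (pvMin_lb cs 10 7 (by norm_num) (pvLB_7 cs p0.1 p0.2 p1 p2 p3 p4 p5 p6.1 p6.2))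
    rw [hM, pvMsg_7]
  rw [if_neg p7]; push_neg at p7
  by_cases p8 : "policy_contract_violation" ∈ cs
  · rw [if_pos p8]
    have hub : pvMin cs 10 ≤ 8 := by
      have h := pvMin_le_mem cs 10 _ p8; rwa [pvRank_key_policy_contract_violation] at h
    have hM : pvMin cs 10 = 8 := le_antisymm hub (pvMin_lb cs 10 8 (by norm_num) (pvLB_8 cs p0.1 p0.2 p1 p2 p3 p4 p5 p6.1 p6.2 p7.1 p7.2))
    rw [hM, pvMsg_8]
  rw [if_neg p8]
  by_cases p9 : "unknown_step_executed" ∈ cs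
  · rw [if_pos p9]
    have hub : pvMin cs 10 ≤ 9 := by
      have h := pvMin_le_mem cs 10 _ p9; rwa [pvRank_key_unknown_step_executed] at h
    have hM : pvMin cs 10 = 9 := le_antisymm hub (pvMin_lb cs 10 9 (by norm_num) (pvLB_9 cs p0.1 p0.2 p1 p2 p3 p4 p5 p6.1 p6.2 p7.1 p7.2 p8))
    rw [hM, pvMsg_9]
  rw [if_neg p9]
  have hM : pvMin cs 10 = 10 := le_antisymm (pvMin_le_init cs 10) (pvMin_lb cs 10 10 le_rfl (pvLB_10 cs p0.1 p0.2 p1 p2 p3 p4 p5 p6.1 p6.2 p7.1 p7.2 p8 p9))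
  rw [hM, pvMsg_10]
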